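-- pv_equiv track=rewrite | github.com/KXvira/AI-Financial-Agent | backend/analytics/business_intelligence.py | _generate_seasonal_recommendations
-- ===== SOURCE A (Python) =====
-- from typing import Dict, List, Optional, Any, Tuple
--
-- def _generate_seasonal_recommendations(monthly_analysis: Dict, quarterly_analysis: Dict) -> List[str]:
--     """Generate recommendations based on seasonal patterns"""
--     recommendations = []
--
--     peak_months = [month for month, data in monthly_analysis.items() if data['pattern'] == 'above_average']
--     low_months = [month for month, data in monthly_analysis.items() if data['pattern'] == 'below_average']
--
--     if peak_months:
--         recommendations.append(f"Peak performance months: {', '.join(map(str, peak_months))}. Consider increasing inventory and staffing.")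
--
--     if low_months:
--         recommendations.append(f"Low performance months: {', '.join(map(str, low_months))}. Plan cost reduction strategies.")
--
--     return recommendations
-- ===== SOURCE B (Python) =====
-- def _generate_seasonal_recommendations(monthly_analysis, quarterly_analysis):
--     """Generate recommendations based on seasonal patterns (pattern index + table-driven output)"""
--     groups = {}
--     for month, data in monthly_analysis.items():
--         groups.setdefault(data['pattern'], []).append(month)
--
--     recommendations = []
--     for pattern, prefix, suffix in (
--         ('above_average', 'Peak performance months: ', '. Consider increasing inventory and staffing.'),
--         ('below_average', 'Low performance months: ', '. Plan cost reduction strategies.'),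
--     ):
--         months = groups.get(pattern, [])
--         if months:
--             recommendations.append(prefix + ', '.join(map(str, months)) + suffix)
--     return recommendations
-- ===== Notes on version B (the rewrite author's own statement) =====
-- stated objective: alternative
-- what changed: Builds a dict index grouping months by their pattern value in one pass, then generates the output by iterating a (pattern, prefix, suffix) table and looking each category up in the index, instead of A's per-category comprehension scans and hard-coded if-blocks.
import Mathlib
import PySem

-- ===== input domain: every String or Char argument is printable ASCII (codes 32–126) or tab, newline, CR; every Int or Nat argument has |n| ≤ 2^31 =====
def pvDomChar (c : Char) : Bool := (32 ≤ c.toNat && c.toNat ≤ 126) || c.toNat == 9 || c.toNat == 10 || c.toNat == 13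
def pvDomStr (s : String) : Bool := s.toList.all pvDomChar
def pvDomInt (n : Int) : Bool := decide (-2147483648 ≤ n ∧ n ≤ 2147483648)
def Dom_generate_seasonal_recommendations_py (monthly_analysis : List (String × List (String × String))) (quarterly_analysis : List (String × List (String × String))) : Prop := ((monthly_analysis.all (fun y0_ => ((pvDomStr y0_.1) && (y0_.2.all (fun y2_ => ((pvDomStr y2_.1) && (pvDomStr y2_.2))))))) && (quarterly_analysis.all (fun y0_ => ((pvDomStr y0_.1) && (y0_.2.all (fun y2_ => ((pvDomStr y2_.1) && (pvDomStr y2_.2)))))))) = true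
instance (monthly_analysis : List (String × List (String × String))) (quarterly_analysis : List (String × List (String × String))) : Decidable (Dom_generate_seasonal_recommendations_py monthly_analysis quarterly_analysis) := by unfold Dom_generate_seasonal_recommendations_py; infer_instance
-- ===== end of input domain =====

-- B replaces A's per-category comprehension scans with one dict-grouping pass by pattern plus a table-driven output loop (objective: alternative); equal on Pre_ (every month's dict has a 'pattern' key).

-- ===== PORT A =====
-- data['pattern'] is ported via PySem.Dict.getD; the none/KeyError case is excluded by Pre_ below.
def pvPattern (d : List (String × String)) : String :=
  (PySem.Dict.mk d).getD "pattern" ""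

def generate_seasonal_recommendations_py (monthly_analysis : List (String × List (String × String))) (quarterly_analysis : List (String × List (String × String))) : List String :=
  let recommendations : List String := []
  let peak_months := (monthly_analysis.filter (fun p => pvPattern p.2 == "above_average")).map (·.1)
  let low_months := (monthly_analysis.filter (fun p => pvPattern p.2 == "below_average")).map (·.1)
  let recommendations := if peak_months.isEmpty then recommendations else
    recommendations ++ ["Peak performance months: " ++ PySem.Str.join ", " peak_months ++ ". Consider increasing inventory and staffing."]
  let recommendations := if low_months.isEmpty then recommendations else
    recommendations ++ ["Low performance months: " ++ PySem.Str.join ", " low_months ++ ". Plan cost reduction strategies."]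
  recommendations

-- ===== PORT B =====
-- groups.setdefault(data['pattern'], []).append(month) = Dict.modify (pattern) [] (· ++ [month])
def generate_seasonal_recommendations_py_alt (monthly_analysis : List (String × List (String × String))) (quarterly_analysis : List (String × List (String × String))) : List String :=
  let groups := monthly_analysis.foldl
    (fun (g : PySem.Dict String (List String)) p => g.modify (pvPattern p.2) [] (· ++ [p.1]))
    PySem.Dict.empty
  [("above_average", "Peak performance months: ", ". Consider increasing inventory and staffing."),
   ("below_average", "Low performance months: ", ". Plan cost reduction strategies.")].foldl
    (fun (recommendations : List String) t =>
      let months := groups.getD t.1 []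
      if months.isEmpty then recommendations
      else recommendations ++ [t.2.1 ++ PySem.Str.join ", " months ++ t.2.2]) []

-- ===== PRECONDITION & SPEC =====
-- Pre_ excludes inputs where some month's data dict lacks the 'pattern' key: Python A (and B) raises KeyError there.
def Pre_generate_seasonal_recommendations_py (monthly_analysis : List (String × List (String × String))) (quarterly_analysis : List (String × List (String × String))) : Prop :=
  ∀ p ∈ monthly_analysis, ((PySem.Dict.mk p.2).get? "pattern").isSome = true
instance (monthly_analysis : List (String × List (String × String))) (quarterly_analysis : List (String × List (String × String))) : Decidable (Pre_generate_seasonal_recommendations_py monthly_analysis quarterly_analysis) := by unfold Pre_generate_seasonal_recommendations_py; infer_instance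
def pvWitness_generate_seasonal_recommendations_py : (List (String × List (String × String))) × (List (String × List (String × String))) :=
  ([("Jan", [("pattern", "above_average")]), ("Feb", [("pattern", "below_average")])], [])

def Spec_generate_seasonal_recommendations_py (monthly_analysis : List (String × List (String × String))) (quarterly_analysis : List (String × List (String × String))) (out : List String) : Prop := out = generate_seasonal_recommendations_py_alt monthly_analysis quarterly_analysis
instance (monthly_analysis : List (String × List (String × String))) (quarterly_analysis : List (String × List (String × String))) (out : List String) : Decidable (Spec_generate_seasonal_recommendations_py monthly_analysis quarterly_analysis out) := by unfold Spec_generate_seasonal_recommendations_py; infer_instance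

-- ===== CLAIM =====
def Claim_equal_generate_seasonal_recommendations_py : Prop := ∀ (monthly_analysis : List (String × List (String × String))) (quarterly_analysis : List (String × List (String × String))), Dom_generate_seasonal_recommendations_py monthly_analysis quarterly_analysis → Pre_generate_seasonal_recommendations_py monthly_analysis quarterly_analysis → Spec_generate_seasonal_recommendations_py monthly_analysis quarterly_analysis (generate_seasonal_recommendations_py monthly_analysis quarterly_analysis)

-- ===== LEMMAS AND PROOFS =====

-- The grouping loop keyed by pvPattern, read at any key c, yields exactly A's filter-and-map of that category.
theorem pvGroups_getD (m : List (String × List (String × String))) (c : String) :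
    (m.foldl (fun (g : PySem.Dict String (List String)) p => g.modify (pvPattern p.2) [] (· ++ [p.1]))
      PySem.Dict.empty).getD c []
    = (m.filter (fun p => pvPattern p.2 == c)).map (·.1) := by
  have h : (m.foldl (fun (g : PySem.Dict String (List String)) p => g.modify (pvPattern p.2) [] (· ++ [p.1]))
      PySem.Dict.empty)
    = ((m.map (fun p => (pvPattern p.2, p.1))).foldl
        (fun (g : PySem.Dict String (List String)) p => g.modify p.1 [] (· ++ [p.2]))
        PySem.Dict.empty) := by
    rw [List.foldl_map]
  rw [h, PySem.Dict.getD_foldl_modify_append]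
  simp [List.filter_map, Function.comp_def]

-- ===== VERDICT =====
theorem generate_seasonal_recommendations_py_spec : Claim_equal_generate_seasonal_recommendations_py := by
  intro m q _ _
  unfold Spec_generate_seasonal_recommendations_py
  unfold generate_seasonal_recommendations_py generate_seasonal_recommendations_py_alt
  simp only [List.foldl_cons, List.foldl_nil, pvGroups_getD]
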